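-- pv_equiv track=rewrite | github.com/brianopasferreira/pangeia-reservas | app.py | gerar_horas
-- ===== SOURCE A (Python) =====
-- def gerar_horas(hora_inicio: int, minuto_inicio: int, hora_fim: int) -> list[str]:
--     horas = []
--     for hora in range(hora_inicio, hora_fim + 1):
--         for minuto in (0, 15, 30, 45):
--             if hora == hora_inicio and minuto < minuto_inicio:
--                 continue
--             if hora == hora_fim and minuto > 0:
--                 continue
--             horas.append(f"{hora:02d}:{minuto:02d}")
--     return horas
-- ===== SOURCE B (Python) =====
-- def gerar_horas(hora_inicio: int, minuto_inicio: int, hora_fim: int) -> list[str]: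
--     if minuto_inicio > 45:
--         start = (hora_inicio + 1) * 60
--     elif minuto_inicio <= 0:
--         start = hora_inicio * 60
--     else:
--         start = hora_inicio * 60 + (minuto_inicio + 14) // 15 * 15
--     return [f"{t // 60:02d}:{t % 60:02d}" for t in range(start, hora_fim * 60 + 1, 15)]
-- ===== Notes on version B (the rewrite author's own statement) =====
-- stated objective: simpler
-- what changed: Replaces A's nested hour/minute loops with per-slot filters by computing the first valid start time in minutes arithmetically (rounding minuto_inicio up to a multiple of 15, rolling past 45 into the next hour) and emitting one comprehension over a single filter-free range(start, hora_fim*60+1, 15) of total minutes.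
import Mathlib
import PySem

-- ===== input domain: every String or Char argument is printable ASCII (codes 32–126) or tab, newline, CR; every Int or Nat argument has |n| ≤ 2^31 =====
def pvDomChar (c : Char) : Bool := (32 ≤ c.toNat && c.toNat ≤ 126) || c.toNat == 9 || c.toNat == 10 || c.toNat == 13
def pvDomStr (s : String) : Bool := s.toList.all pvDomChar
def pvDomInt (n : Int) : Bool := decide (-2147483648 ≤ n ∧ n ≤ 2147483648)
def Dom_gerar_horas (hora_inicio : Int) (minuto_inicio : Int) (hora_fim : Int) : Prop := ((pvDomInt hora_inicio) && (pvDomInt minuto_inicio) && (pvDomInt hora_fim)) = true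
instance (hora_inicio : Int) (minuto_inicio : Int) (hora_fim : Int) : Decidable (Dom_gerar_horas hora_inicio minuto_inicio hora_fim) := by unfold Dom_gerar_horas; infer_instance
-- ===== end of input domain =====

-- B replaces A's nested hour/minute loops and per-slot filters with start-time arithmetic and one
-- flat 15-minute-step loop over total minutes (objective: simpler).

-- shared f-string helper: f"{h:02d}:{m:02d}".  f"{n:02d}" pads str(n) with '0' exactly when it is a
-- single character (exact for width 2: a negative number's '-' already fills the width).
def pyPad2 (n : Int) : List Char :=
  let s := PySem.Int.toChars n
  if s.length < 2 then '0' :: s else s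

def pyFmtHM (h m : Int) : String := String.ofList (pyPad2 h ++ ':' :: pyPad2 m)

-- ===== PORT A =====
def gerar_horas (hora_inicio : Int) (minuto_inicio : Int) (hora_fim : Int) : List String :=
  (PySem.List.pyRange hora_inicio (hora_fim + 1) 1).foldl (fun horas hora =>
    ([0, 15, 30, 45] : List Int).foldl (fun horas minuto =>
      if hora = hora_inicio ∧ minuto < minuto_inicio then horas
      else if hora = hora_fim ∧ minuto > 0 then horas
      else horas ++ [pyFmtHM hora minuto]) horas) []

-- ===== PORT B =====
def gerar_horas_alt (hora_inicio : Int) (minuto_inicio : Int) (hora_fim : Int) : List String :=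
  let start : Int :=
    if minuto_inicio > 45 then (hora_inicio + 1) * 60
    else if minuto_inicio ≤ 0 then hora_inicio * 60
    else hora_inicio * 60 + PySem.Int.floordiv (minuto_inicio + 14) 15 * 15
  (PySem.List.pyRange start (hora_fim * 60 + 1) 15).map
    (fun t => pyFmtHM (PySem.Int.floordiv t 60) (PySem.Int.mod t 60))

-- ===== PRECONDITION & SPEC =====
def Spec_gerar_horas (hora_inicio : Int) (minuto_inicio : Int) (hora_fim : Int) (out : List String) : Prop := out = gerar_horas_alt hora_inicio minuto_inicio hora_fim
instance (hora_inicio : Int) (minuto_inicio : Int) (hora_fim : Int) (out : List String) : Decidable (Spec_gerar_horas hora_inicio minuto_inicio hora_fim out) := by unfold Spec_gerar_horas; infer_instance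

-- ===== CLAIM (what is proved, stated in full; the proofs are below) =====
def Claim_equal_gerar_horas : Prop := ∀ (hora_inicio : Int) (minuto_inicio : Int) (hora_fim : Int), Dom_gerar_horas hora_inicio minuto_inicio hora_fim → Spec_gerar_horas hora_inicio minuto_inicio hora_fim (gerar_horas hora_inicio minuto_inicio hora_fim)

-- ===== LEMMAS AND PROOFS =====

-- A's inner-loop contribution for one minute value
def keepA (hi mi hf hora m : Int) : List String :=
  if hora = hi ∧ m < mi then []
  else if hora = hf ∧ m > 0 then []
  else [pyFmtHM hora m]

-- A's contribution for one hour
def slotA (hi mi hf hora : Int) : List String :=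
  keepA hi mi hf hora 0 ++ keepA hi mi hf hora 15 ++ keepA hi mi hf hora 30 ++ keepA hi mi hf hora 45

-- A's contribution for an hour that is not the first
def gmid (hf hora : Int) : List String :=
  if hora = hf then [pyFmtHM hora 0]
  else [pyFmtHM hora 0, pyFmtHM hora 15, pyFmtHM hora 30, pyFmtHM hora 45]

lemma A_flat (hi mi hf : Int) :
    gerar_horas hi mi hf = (PySem.List.pyRange hi (hf + 1) 1).flatMap (slotA hi mi hf) := by
  unfold gerar_horas
  rw [PySem.List.foldl_congr_mem _ _ (fun acc hora => acc ++ slotA hi mi hf hora) []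
    (by
      intro acc x _
      simp only [List.foldl, slotA, keepA]
      split_ifs <;> simp)]
  simpa using PySem.List.foldl_append_eq_flatMap (slotA hi mi hf) _ []

lemma slot_mid (hi mi hf hora : Int) (h : hora ≠ hi) : slotA hi mi hf hora = gmid hf hora := by
  unfold slotA keepA gmid
  by_cases hhf : hora = hf
  · rw [if_neg (by omega), if_neg (by omega), if_neg (by omega), if_pos ⟨hhf, by norm_num⟩,
        if_neg (by omega), if_pos ⟨hhf, by norm_num⟩, if_neg (by omega), if_pos ⟨hhf, by norm_num⟩,
        if_pos hhf]
    rfl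
  · rw [if_neg (by omega), if_neg (by omega), if_neg (by omega), if_neg (by omega),
        if_neg (by omega), if_neg (by omega), if_neg (by omega), if_neg (by omega),
        if_neg hhf]
    rfl

-- the five buckets of the first hour (hi ≠ hf)
lemma slotA_b0 (hi mi hf : Int) (hne : hi ≠ hf) (hm : mi ≤ 0) :
    slotA hi mi hf hi = [pyFmtHM hi 0, pyFmtHM hi 15, pyFmtHM hi 30, pyFmtHM hi 45] := by
  unfold slotA keepA
  rw [if_neg (by omega), if_neg (by omega), if_neg (by omega), if_neg (by omega),
      if_neg (by omega), if_neg (by omega), if_neg (by omega), if_neg (by omega)]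
  rfl

lemma slotA_b15 (hi mi hf : Int) (hne : hi ≠ hf) (hl : 0 < mi) (hu : mi ≤ 15) :
    slotA hi mi hf hi = [pyFmtHM hi 15, pyFmtHM hi 30, pyFmtHM hi 45] := by
  unfold slotA keepA
  rw [if_pos ⟨rfl, by omega⟩, if_neg (by omega), if_neg (by omega),
      if_neg (by omega), if_neg (by omega), if_neg (by omega), if_neg (by omega)]
  rfl

lemma slotA_b30 (hi mi hf : Int) (hne : hi ≠ hf) (hl : 15 < mi) (hu : mi ≤ 30) :
    slotA hi mi hf hi = [pyFmtHM hi 30, pyFmtHM hi 45] := by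
  unfold slotA keepA
  rw [if_pos ⟨rfl, by omega⟩, if_pos ⟨rfl, by omega⟩, if_neg (by omega), if_neg (by omega),
      if_neg (by omega), if_neg (by omega)]
  rfl

lemma slotA_b45 (hi mi hf : Int) (hne : hi ≠ hf) (hl : 30 < mi) (hu : mi ≤ 45) :
    slotA hi mi hf hi = [pyFmtHM hi 45] := by
  unfold slotA keepA
  rw [if_pos ⟨rfl, by omega⟩, if_pos ⟨rfl, by omega⟩, if_pos ⟨rfl, by omega⟩,
      if_neg (by omega), if_neg (by omega)]
  rfl

lemma slotA_bnone (hi mi hf : Int) (hl : 45 < mi) : slotA hi mi hf hi = [] := by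
  unfold slotA keepA
  rw [if_pos ⟨rfl, by omega⟩, if_pos ⟨rfl, by omega⟩, if_pos ⟨rfl, by omega⟩,
      if_pos ⟨rfl, by omega⟩]
  rfl

-- the single hour hi = hf
lemma slotA_one0 (hi mi : Int) (hm : mi ≤ 0) : slotA hi mi hi hi = [pyFmtHM hi 0] := by
  unfold slotA keepA
  rw [if_neg (by omega), if_neg (by omega), if_neg (by omega), if_pos ⟨rfl, by norm_num⟩,
      if_neg (by omega), if_pos ⟨rfl, by norm_num⟩, if_neg (by omega), if_pos ⟨rfl, by norm_num⟩]
  rfl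

lemma slotA_onenone (hi mi : Int) (hm : 0 < mi) : slotA hi mi hi hi = [] := by
  unfold slotA keepA
  rw [if_pos ⟨rfl, by omega⟩]
  by_cases h15 : 15 < mi
  · rw [if_pos ⟨rfl, by omega⟩]
    by_cases h30 : 30 < mi
    · rw [if_pos ⟨rfl, by omega⟩]
      by_cases h45 : 45 < mi
      · rw [if_pos ⟨rfl, by omega⟩]; rfl
      · rw [if_neg (by omega), if_pos ⟨rfl, by norm_num⟩]; rfl
    · rw [if_neg (by omega), if_pos ⟨rfl, by norm_num⟩, if_neg (by omega),
          if_pos ⟨rfl, by norm_num⟩]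
      rfl
  · rw [if_neg (by omega), if_pos ⟨rfl, by norm_num⟩, if_neg (by omega), if_pos ⟨rfl, by norm_num⟩,
        if_neg (by omega), if_pos ⟨rfl, by norm_num⟩]
    rfl

lemma gmid_self (hf : Int) : gmid hf hf = [pyFmtHM hf 0] := by
  unfold gmid; rw [if_pos rfl]

lemma gmid_ne (hf hora : Int) (h : hora ≠ hf) :
    gmid hf hora = [pyFmtHM hora 0, pyFmtHM hora 15, pyFmtHM hora 30, pyFmtHM hora 45] := by
  unfold gmid; rw [if_neg h]

lemma fmt_div (h m : Int) (h0 : 0 ≤ m) (h60 : m < 60) :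
    PySem.Int.floordiv (h * 60 + m) 60 = h ∧ PySem.Int.mod (h * 60 + m) 60 = m := by
  have hd : PySem.Int.floordiv (h * 60 + m) 60 = h :=
    (PySem.Int.floordiv_eq_iff_of_pos (by norm_num)).2 (by constructor <;> nlinarith)
  refine ⟨hd, ?_⟩
  have := PySem.Int.floordiv_mul_add_mod (h * 60 + m) 60
  rw [hd] at this; omega

lemma pyRange15_nil {a b : Int} (h : b ≤ a) : PySem.List.pyRange a b 15 = [] := by
  rw [PySem.List.pyRange_of_pos a b (by norm_num), if_neg (by omega)]
  simp

lemma pyRange15_cons {a b : Int} (h : a < b) :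
    PySem.List.pyRange a b 15 = a :: PySem.List.pyRange (a + 15) b 15 := by
  rw [PySem.List.pyRange_of_pos a b (by norm_num),
      PySem.List.pyRange_of_pos (a + 15) b (by norm_num)]
  by_cases h2 : a + 15 < b
  · rw [if_pos h, if_pos h2]
    have hn : ((b - a + 15 - 1) / 15).toNat = ((b - (a + 15) + 15 - 1) / 15).toNat + 1 := by omega
    rw [hn, List.range_succ_eq_map]
    simp only [List.map_cons, List.map_map, Nat.cast_zero, mul_zero, add_zero, List.cons.injEq,
      true_and]
    apply List.map_congr_left
    intro k _
    simp only [Function.comp_apply, Nat.succ_eq_add_one]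
    push_cast
    ring
  · rw [if_pos h, if_neg h2]
    have hn : ((b - a + 15 - 1) / 15).toNat = 1 := by omega
    rw [hn]
    simp

lemma mid_eq : ∀ (n : Nat) (h hf : Int), h ≤ hf → (hf - h).toNat = n →
    (PySem.List.pyRange h (hf + 1) 1).flatMap (gmid hf)
      = (PySem.List.pyRange (h * 60) (hf * 60 + 1) 15).map
          (fun t => pyFmtHM (PySem.Int.floordiv t 60) (PySem.Int.mod t 60)) := by
  intro n
  induction n with
  | zero =>
    intro h hf h1 h2
    have he : h = hf := by omega
    subst he
    rw [PySem.List.pyRange_one_cons (by omega), PySem.List.pyRange_one_eq_nil (by omega),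
        pyRange15_cons (by omega), pyRange15_nil (by omega)]
    have hf0 := fmt_div h 0 (by norm_num) (by norm_num)
    simp only [add_zero] at hf0
    simp only [List.flatMap_cons, List.flatMap_nil, List.append_nil, List.map_cons, List.map_nil,
      hf0.1, hf0.2]
    rw [gmid_self]
  | succ n ih =>
    intro h hf h1 h2
    have hlt : h < hf := by omega
    rw [PySem.List.pyRange_one_cons (show h < hf + 1 by omega),
        pyRange15_cons (show h * 60 < hf * 60 + 1 by omega),
        pyRange15_cons (show h * 60 + 15 < hf * 60 + 1 by omega),
        pyRange15_cons (show h * 60 + 15 + 15 < hf * 60 + 1 by omega),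
        pyRange15_cons (show h * 60 + 15 + 15 + 15 < hf * 60 + 1 by omega),
        show h * 60 + 15 + 15 + 15 + 15 = (h + 1) * 60 by ring]
    have h0 := fmt_div h 0 (by norm_num) (by norm_num)
    simp only [add_zero] at h0
    have h15 := fmt_div h 15 (by norm_num) (by norm_num)
    have h30 : PySem.Int.floordiv (h * 60 + 15 + 15) 60 = h ∧
        PySem.Int.mod (h * 60 + 15 + 15) 60 = 30 := by
      rw [show h * 60 + 15 + 15 = h * 60 + 30 by ring]
      exact fmt_div h 30 (by norm_num) (by norm_num)
    have h45 : PySem.Int.floordiv (h * 60 + 15 + 15 + 15) 60 = h ∧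
        PySem.Int.mod (h * 60 + 15 + 15 + 15) 60 = 45 := by
      rw [show h * 60 + 15 + 15 + 15 = h * 60 + 45 by ring]
      exact fmt_div h 45 (by norm_num) (by norm_num)
    rw [List.flatMap_cons, ih (h + 1) hf (by omega) (by omega),
      gmid_ne hf h (by omega)]
    simp only [List.map_cons, h0.1, h0.2, h15.1, h15.2, h30.1, h30.2, h45.1, h45.2,
      List.cons_append, List.nil_append]

lemma main_eq (hi mi hf : Int) : gerar_horas hi mi hf = gerar_horas_alt hi mi hf := by
  have halt : gerar_horas_alt hi mi hf =
      (PySem.List.pyRange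
        (if mi > 45 then (hi + 1) * 60
         else if mi ≤ 0 then hi * 60
         else hi * 60 + PySem.Int.floordiv (mi + 14) 15 * 15) (hf * 60 + 1) 15).map
        (fun t => pyFmtHM (PySem.Int.floordiv t 60) (PySem.Int.mod t 60)) := rfl
  rw [A_flat, halt]
  by_cases hle : hi ≤ hf
  · rw [PySem.List.pyRange_one_cons (show hi < hf + 1 by omega), List.flatMap_cons,
        List.flatMap_congr (fun x hx => slot_mid hi mi hf x
          (by have := (PySem.List.mem_pyRange_one.1 hx).1; omega))]
    by_cases heq : hi = hf
    · subst heq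
      rw [PySem.List.pyRange_one_eq_nil (by omega)]
      simp only [List.flatMap_nil, List.append_nil]
      by_cases hm45 : mi > 45
      · rw [if_pos hm45, pyRange15_nil (by omega), slotA_bnone hi mi hi hm45, List.map_nil]
      · by_cases hm0 : mi ≤ 0
        · rw [if_neg hm45, if_pos hm0, pyRange15_cons (by omega), pyRange15_nil (by omega),
              slotA_one0 hi mi hm0]
          have h0 := fmt_div hi 0 (by norm_num) (by norm_num)
          simp only [add_zero] at h0
          simp only [List.map_cons, List.map_nil, h0.1, h0.2]
        · rw [if_neg hm45, if_neg hm0]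
          have hq : 1 ≤ PySem.Int.floordiv (mi + 14) 15 := by
            rw [PySem.Int.le_floordiv_iff_mul_le (by norm_num)]; omega
          rw [pyRange15_nil (by nlinarith), slotA_onenone hi mi (by omega), List.map_nil]
    · have hlt : hi < hf := by omega
      rw [mid_eq (hf - (hi + 1)).toNat (hi + 1) hf (by omega) rfl]
      have h0 := fmt_div hi 0 (by norm_num) (by norm_num)
      simp only [add_zero] at h0
      have h15 := fmt_div hi 15 (by norm_num) (by norm_num)
      have h30 : PySem.Int.floordiv (hi * 60 + 15 + 15) 60 = hi ∧
          PySem.Int.mod (hi * 60 + 15 + 15) 60 = 30 := by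
        rw [show hi * 60 + 15 + 15 = hi * 60 + 30 by ring]
        exact fmt_div hi 30 (by norm_num) (by norm_num)
      have h45 : PySem.Int.floordiv (hi * 60 + 15 + 15 + 15) 60 = hi ∧
          PySem.Int.mod (hi * 60 + 15 + 15 + 15) 60 = 45 := by
        rw [show hi * 60 + 15 + 15 + 15 = hi * 60 + 45 by ring]
        exact fmt_div hi 45 (by norm_num) (by norm_num)
      by_cases hm45 : mi > 45
      · rw [if_pos hm45, slotA_bnone hi mi hf hm45, List.nil_append]
      · by_cases hm0 : mi ≤ 0
        · rw [if_neg hm45, if_pos hm0,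
              pyRange15_cons (show hi * 60 < hf * 60 + 1 by omega),
              pyRange15_cons (show hi * 60 + 15 < hf * 60 + 1 by omega),
              pyRange15_cons (show hi * 60 + 15 + 15 < hf * 60 + 1 by omega),
              pyRange15_cons (show hi * 60 + 15 + 15 + 15 < hf * 60 + 1 by omega),
              show hi * 60 + 15 + 15 + 15 + 15 = (hi + 1) * 60 by ring,
              slotA_b0 hi mi hf heq hm0]
          simp only [List.map_cons, h0.1, h0.2, h15.1, h15.2, h30.1, h30.2, h45.1, h45.2,
            List.cons_append, List.nil_append]
        · rw [if_neg hm45, if_neg hm0]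
          rcases (show PySem.Int.floordiv (mi + 14) 15 = 1 ∧ 0 < mi ∧ mi ≤ 15
              ∨ PySem.Int.floordiv (mi + 14) 15 = 2 ∧ 15 < mi ∧ mi ≤ 30
              ∨ PySem.Int.floordiv (mi + 14) 15 = 3 ∧ 30 < mi ∧ mi ≤ 45 by
            by_cases hb1 : mi ≤ 15
            · exact Or.inl ⟨(PySem.Int.floordiv_eq_iff_of_pos (by norm_num)).2 (by omega),
                by omega, hb1⟩
            · by_cases hb2 : mi ≤ 30
              · exact Or.inr (Or.inl ⟨(PySem.Int.floordiv_eq_iff_of_pos (by norm_num)).2 (by omega),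
                  by omega, hb2⟩)
              · exact Or.inr (Or.inr ⟨(PySem.Int.floordiv_eq_iff_of_pos (by norm_num)).2 (by omega),
                  by omega, by omega⟩)) with
            ⟨hq, hl, hu⟩ | ⟨hq, hl, hu⟩ | ⟨hq, hl, hu⟩
          · rw [hq, show hi * 60 + 1 * 15 = hi * 60 + 15 by ring,
                pyRange15_cons (show hi * 60 + 15 < hf * 60 + 1 by omega),
                pyRange15_cons (show hi * 60 + 15 + 15 < hf * 60 + 1 by omega),
                pyRange15_cons (show hi * 60 + 15 + 15 + 15 < hf * 60 + 1 by omega),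
                show hi * 60 + 15 + 15 + 15 + 15 = (hi + 1) * 60 by ring,
                slotA_b15 hi mi hf heq hl hu]
            simp only [List.map_cons, h15.1, h15.2, h30.1, h30.2, h45.1, h45.2,
              List.cons_append, List.nil_append]
          · have h30' : PySem.Int.floordiv (hi * 60 + 30 + 15) 60 = hi ∧
                PySem.Int.mod (hi * 60 + 30 + 15) 60 = 45 := by
              rw [show hi * 60 + 30 + 15 = hi * 60 + 45 by ring]
              exact fmt_div hi 45 (by norm_num) (by norm_num)
            have h30'' := fmt_div hi 30 (by norm_num) (by norm_num)
            rw [hq, show hi * 60 + 2 * 15 = hi * 60 + 30 by ring,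
                pyRange15_cons (show hi * 60 + 30 < hf * 60 + 1 by omega),
                pyRange15_cons (show hi * 60 + 30 + 15 < hf * 60 + 1 by omega),
                show hi * 60 + 30 + 15 + 15 = (hi + 1) * 60 by ring,
                slotA_b30 hi mi hf heq hl hu]
            simp only [List.map_cons, h30''.1, h30''.2, h30'.1, h30'.2,
              List.cons_append, List.nil_append]
          · have h45' := fmt_div hi 45 (by norm_num) (by norm_num)
            rw [hq, show hi * 60 + 3 * 15 = hi * 60 + 45 by ring,
                pyRange15_cons (show hi * 60 + 45 < hf * 60 + 1 by omega),
                show hi * 60 + 45 + 15 = (hi + 1) * 60 by ring,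
                slotA_b45 hi mi hf heq hl hu]
            simp only [List.map_cons, h45'.1, h45'.2, List.cons_append, List.nil_append]
  · rw [PySem.List.pyRange_one_eq_nil (by omega)]
    by_cases hm45 : mi > 45
    · rw [if_pos hm45, pyRange15_nil (by omega)]; simp
    · by_cases hm0 : mi ≤ 0
      · rw [if_neg hm45, if_pos hm0, pyRange15_nil (by omega)]; simp
      · rw [if_neg hm45, if_neg hm0]
        have hq : 1 ≤ PySem.Int.floordiv (mi + 14) 15 := by
          rw [PySem.Int.le_floordiv_iff_mul_le (by norm_num)]; omega
        rw [pyRange15_nil (by nlinarith)]; simp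

-- ===== VERDICT (by name: the statement is the Claim_ definition above) =====
theorem gerar_horas_spec : Claim_equal_gerar_horas := by
  unfold Claim_equal_gerar_horas Spec_gerar_horas
  intro hi mi hf _
  exact main_eq hi mi hf
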